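-- pv_equiv track=rewrite | github.com/joshuab1000/chesapeake-checkup | main.py | get_latest_data
-- ===== SOURCE A (Python) =====
-- def get_latest_data(water_quality_data):
--     '''Get the most recently uploaded data, return it as a list of dictionaries with paramaters as the keys.'''
--     latest_data = {}
--     for sample in water_quality_data:
--         parameter = sample["Parameter"]
--         if parameter not in latest_data.keys():
--             latest_data[parameter] = sample
--         else:
--             if sample["SampleDate"] > latest_data[parameter]["SampleDate"]:
--                 latest_data[parameter] = sample
--     return(latest_data)
-- ===== SOURCE B (Python) =====
-- def get_latest_data(water_quality_data):
--     '''Get the most recently uploaded data, return it as a list of dictionaries with paramaters as the keys.'''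
--     groups = {}
--     for sample in water_quality_data:
--         groups.setdefault(sample["Parameter"], []).append(sample)
--     return {parameter: max(samples, key=lambda s: s["SampleDate"])
--             for parameter, samples in groups.items()}
-- ===== Notes on version B (the rewrite author's own statement) =====
-- stated objective: alternative
-- what changed: B first groups the samples by parameter into lists (one setdefault/append pass) and then picks max(group, key=SampleDate) per group, instead of A's single pass that keeps a running latest sample per parameter.
-- outside the precondition, e.g. on get_latest_data([{'Parameter': 'p'}]): A returns {'p': {'Parameter': 'p'}}, B raises KeyError
import Mathlib
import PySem

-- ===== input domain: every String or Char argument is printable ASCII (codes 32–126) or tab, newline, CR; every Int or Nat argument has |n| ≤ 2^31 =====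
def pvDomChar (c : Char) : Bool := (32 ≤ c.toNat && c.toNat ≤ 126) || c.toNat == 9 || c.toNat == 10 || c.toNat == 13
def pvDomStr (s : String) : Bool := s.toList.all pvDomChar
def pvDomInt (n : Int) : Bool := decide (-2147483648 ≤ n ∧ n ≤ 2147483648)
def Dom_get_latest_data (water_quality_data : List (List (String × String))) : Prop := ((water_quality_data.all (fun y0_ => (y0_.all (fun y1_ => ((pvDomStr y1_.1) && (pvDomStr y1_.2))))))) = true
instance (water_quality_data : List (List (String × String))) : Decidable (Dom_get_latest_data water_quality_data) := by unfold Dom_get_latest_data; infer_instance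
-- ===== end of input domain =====

-- B groups the samples by parameter in one pass and then takes max(group, key=SampleDate)
-- per group (first maximum wins, matching A's strict-> rule); same cost, different decomposition.

-- shared helpers: sample["Parameter"] / sample["SampleDate"] (first-match lookup; "" never
-- read under Pre_, where both keys are present)
def pvParam (s : List (String × String)) : String := (s.lookup "Parameter").getD ""
def pvDate (s : List (String × String)) : String := (s.lookup "SampleDate").getD ""

-- ===== PORT A =====
def get_latest_data (water_quality_data : List (List (String × String))) : List (String × List (String × String)) :=
  (water_quality_data.foldl
    (fun (latest_data : PySem.Dict String (List (String × String))) sample =>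
      let parameter := pvParam sample
      if latest_data.contains parameter = false then
        latest_data.insert parameter sample
      else
        if pvDate ((latest_data.get? parameter).getD []) < pvDate sample then
          latest_data.insert parameter sample
        else
          latest_data)
    PySem.Dict.empty).items

-- ===== PORT B =====
def get_latest_data_alt (water_quality_data : List (List (String × String))) : List (String × List (String × String)) :=
  let groups : PySem.Dict String (List (List (String × String))) :=
    water_quality_data.foldl
      (fun g sample => g.modify (pvParam sample) [] (fun l => l ++ [sample]))
      PySem.Dict.empty
  groups.items.map (fun pr => (pr.1, (PySem.List.max? pr.2 pvDate).getD []))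

-- ===== PRECONDITION & SPEC =====
-- Pre_ excludes samples missing the "Parameter" or "SampleDate" key: there the Python A raises
-- KeyError, except when a sample without "SampleDate" has a unique parameter — there A returns it
-- untested while B's max(..., key=...) raises KeyError, so those inputs are excluded too.
def Pre_get_latest_data (water_quality_data : List (List (String × String))) : Prop :=
  (water_quality_data.all
    (fun s => (s.lookup "Parameter").isSome && (s.lookup "SampleDate").isSome)) = true
instance (water_quality_data : List (List (String × String))) : Decidable (Pre_get_latest_data water_quality_data) := by unfold Pre_get_latest_data; infer_instance

def pvWitness_get_latest_data : (List (List (String × String))) :=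
  [[("Parameter", "ph"), ("SampleDate", "2020-01-01")],
   [("Parameter", "ph"), ("SampleDate", "2021-01-01")]]

def Spec_get_latest_data (water_quality_data : List (List (String × String))) (out : List (String × List (String × String))) : Prop := out = get_latest_data_alt water_quality_data
instance (water_quality_data : List (List (String × String))) (out : List (String × List (String × String))) : Decidable (Spec_get_latest_data water_quality_data out) := by unfold Spec_get_latest_data; infer_instance

-- ===== CLAIM (what is proved, stated in full; the proofs are below) =====
def Claim_equal_get_latest_data : Prop := ∀ (water_quality_data : List (List (String × String))), Dom_get_latest_data water_quality_data → Pre_get_latest_data water_quality_data → Spec_get_latest_data water_quality_data (get_latest_data water_quality_data)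

-- ===== LEMMAS AND PROOFS =====

-- common closed form: parameters in first-occurrence order, each mapped to the first
-- date-maximal sample among its occurrences
theorem pvFoldlMax_isSome {α κ : Type} [LT κ] [DecidableLT κ] (key : α → κ)
    (t : List α) (m : α) : (t.foldl
      (fun acc x => match acc with
        | none => some x
        | some m => if key m < key x then some x else some m) (some m)).isSome := by
  induction t generalizing m with
  | nil => rfl
  | cons a t ih => simp only [List.foldl_cons]; split <;> apply ih

theorem pvMax?_isSome {α κ : Type} [LT κ] [DecidableLT κ] (key : α → κ)
    (xs : List α) (h : xs ≠ []) : (PySem.List.max? xs key).isSome := by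
  cases xs with
  | nil => exact absurd rfl h
  | cons a t => exact pvFoldlMax_isSome key t a

def pvCF (l : List (List (String × String))) : List (String × List (String × String)) :=
  (PySem.Set.ofList (l.map pvParam)).map
    (fun k => (k, (PySem.List.max? (l.filter (fun s => pvParam s == k)) pvDate).getD []))

theorem pvB_eq_CF (l : List (List (String × String))) : get_latest_data_alt l = pvCF l := by
  unfold get_latest_data_alt pvCF
  have hfold : l.foldl
      (fun (g : PySem.Dict String (List (List (String × String)))) sample =>
        g.modify (pvParam sample) [] (fun l => l ++ [sample]))
      PySem.Dict.empty
    = (l.map (fun s => (pvParam s, s))).foldl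
        (fun g p => g.modify p.1 [] (fun l => l ++ [p.2])) PySem.Dict.empty := by
    rw [List.foldl_map]
  show (l.foldl (fun (g : PySem.Dict String (List (List (String × String)))) sample => g.modify (pvParam sample) [] (fun l => l ++ [sample])) PySem.Dict.empty).items.map (fun pr => (pr.1, (PySem.List.max? pr.2 pvDate).getD [])) = _
  rw [hfold]
  set lp := l.map (fun s => (pvParam s, s)) with hlp
  set G := lp.foldl (fun (g : PySem.Dict String (List (List (String × String)))) p => g.modify p.1 [] (fun l => l ++ [p.2])) PySem.Dict.empty with hG
  have hkeys : G.keys = PySem.Set.ofList (l.map pvParam) := by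
    rw [hG, hlp, List.foldl_map]
    rw [PySem.Dict.keys_foldl_modify_key (key := pvParam) (d0 := []) (f := fun _ x => (fun l => l ++ [x]))]
    simp [PySem.Set.update, PySem.Set.ofList_eq_foldl]
  have hnodup : G.keys.Nodup := by rw [hkeys]; exact PySem.Set.nodup_ofList _
  have hitems := PySem.Dict.items_eq_map_keys G hnodup []
  rw [hitems, hkeys, List.map_map]
  refine List.map_congr_left (fun k hk => ?_)
  have hgetD : G.getD k [] = l.filter (fun s => pvParam s == k) := by
    rw [hG, PySem.Dict.getD_foldl_modify_append]
    simp [hlp, List.filter_map, Function.comp_def]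
  simp [hgetD]

theorem pvCF_append (l : List (List (String × String))) (x : List (String × String)) :
    pvCF (l ++ [x]) =
      if (pvParam x) ∈ l.map pvParam then
        (PySem.Set.ofList (l.map pvParam)).map
          (fun k => (k, (PySem.List.max? ((l.filter (fun s => pvParam s == k)) ++ (if pvParam x == k then [x] else [])) pvDate).getD []))
      else pvCF l ++ [(pvParam x, x)] := by
  unfold pvCF
  have hset : PySem.Set.ofList ((l ++ [x]).map pvParam)
      = PySem.Set.add (PySem.Set.ofList (l.map pvParam)) (pvParam x) := by
    simp [PySem.Set.ofList_eq_foldl, List.foldl_append]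
  have hfilt : ∀ k, (l ++ [x]).filter (fun s => pvParam s == k)
      = l.filter (fun s => pvParam s == k) ++ (if pvParam x == k then [x] else []) := by
    intro k; rw [List.filter_append]
    by_cases h : pvParam x = k
    · simp [List.filter, h]
    · have hb : (pvParam x == k) = false := beq_eq_false_iff_ne.mpr h
      simp [List.filter, hb]
  by_cases hp : pvParam x ∈ l.map pvParam
  · rw [if_pos hp, hset]
    have hadd : (PySem.Set.ofList (l.map pvParam)).add (pvParam x) = PySem.Set.ofList (l.map pvParam) := by
      simp [PySem.Set.add, PySem.Set.contains, (PySem.Set.mem_ofList _ _).mpr hp]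
    rw [hadd]
    refine List.map_congr_left (fun k hk => ?_)
    rw [hfilt]
  · rw [if_neg hp, hset]
    have hadd : (PySem.Set.ofList (l.map pvParam)).add (pvParam x) = PySem.Set.ofList (l.map pvParam) ++ [pvParam x] := by
      simp [PySem.Set.add, PySem.Set.contains]
      intro s hs h
      exact hp (h ▸ List.mem_map_of_mem hs)
    rw [hadd, List.map_append]
    congr 1
    · refine List.map_congr_left (fun k hk => ?_)
      rw [hfilt]
      have hk' : k ∈ l.map pvParam := (PySem.Set.mem_ofList _ _).mp hk
      have hne : ¬ (pvParam x == k) := by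
        simp only [beq_iff_eq]; rintro rfl; exact hp hk'
      simp [hne]
    · have hnil : l.filter (fun s => pvParam s == pvParam x) = [] := by
        rw [List.filter_eq_nil_iff]
        intro s hs hbe
        exact hp (by rw [← (beq_iff_eq).mp hbe]; exact List.mem_map_of_mem hs)
      simp only [List.map_cons, List.map_nil, hfilt, hnil]
      simp [PySem.List.max?]

theorem pvKeysCF (l : List (List (String × String))) :
    (PySem.Dict.mk (pvCF l)).keys = PySem.Set.ofList (l.map pvParam) := by
  simp only [PySem.Dict.keys, pvCF]
  simp [Function.comp_def]

theorem pvA_eq_CF (l : List (List (String × String))) :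
    l.foldl
      (fun (latest_data : PySem.Dict String (List (String × String))) sample =>
        let parameter := pvParam sample
        if latest_data.contains parameter = false then
          latest_data.insert parameter sample
        else
          if pvDate ((latest_data.get? parameter).getD []) < pvDate sample then
            latest_data.insert parameter sample
          else
            latest_data)
      PySem.Dict.empty = PySem.Dict.mk (pvCF l) := by
  induction l using List.reverseRecOn with
  | nil => rfl
  | append_singleton l x ih =>
    rw [List.foldl_append, List.foldl_cons, List.foldl_nil, ih, pvCF_append]
    by_cases hp : pvParam x ∈ l.map pvParam
    · rw [if_pos hp]
      have hcont : (PySem.Dict.mk (pvCF l)).contains (pvParam x) = true := by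
        rw [PySem.Dict.contains_eq_decide_mem_keys, pvKeysCF]
        exact decide_eq_true ((PySem.Set.mem_ofList _ _).mpr hp)
      have hnodup : (PySem.Dict.mk (pvCF l)).keys.Nodup := by
        rw [pvKeysCF]; exact PySem.Set.nodup_ofList _
      have hssne : l.filter (fun s => pvParam s == pvParam x) ≠ [] := by
        obtain ⟨s, hs, hps⟩ := List.mem_map.mp hp
        intro hnil
        have : s ∈ l.filter (fun s => pvParam s == pvParam x) :=
          List.mem_filter.mpr ⟨hs, beq_iff_eq.mpr hps⟩
        simp [hnil] at this
      obtain ⟨m, hm⟩ := Option.isSome_iff_exists.mp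
        (pvMax?_isSome pvDate (l.filter (fun s => pvParam s == pvParam x)) hssne)
      have hmem : (pvParam x, (PySem.List.max? (l.filter (fun s => pvParam s == pvParam x)) pvDate).getD []) ∈ pvCF l := by
        unfold pvCF
        exact List.mem_map.mpr ⟨pvParam x, (PySem.Set.mem_ofList _ _).mpr hp, rfl⟩
      have hmem' : (pvParam x, m) ∈ pvCF l := by
        rw [hm] at hmem; simpa using hmem
      have hget : (PySem.Dict.mk (pvCF l)).get? (pvParam x) = some m :=
        PySem.Dict.get?_of_mem_items _ hmem' hnodup
      have hmax : PySem.List.max? (l.filter (fun s => pvParam s == pvParam x) ++ [x]) pvDate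
          = if pvDate m < pvDate x then some x else some m := by
        have hm2 := hm
        unfold PySem.List.max? at hm2 ⊢
        rw [List.foldl_append, hm2]
        simp [List.foldl]
      simp only [hcont, Bool.true_eq_false, if_false, hget, Option.getD_some]
      by_cases hlt : pvDate m < pvDate x
      · rw [if_pos hlt]
        apply PySem.Dict.ext
        rw [PySem.Dict.items_insert_of_contains _ _ hcont]
        show (pvCF l).map _ = _
        unfold pvCF
        rw [List.map_map]
        refine List.map_congr_left (fun k hk => ?_)
        by_cases hkp : k = pvParam x
        · subst hkp
          simp only [Function.comp_apply, BEq.rfl, if_pos]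
          simp [hmax, hlt]
        · have hb : (k == pvParam x) = false := beq_eq_false_iff_ne.mpr hkp
          have hb' : (pvParam x == k) = false := beq_eq_false_iff_ne.mpr (Ne.symm hkp)
          simp [Function.comp, hb, hb']
      · rw [if_neg hlt]
        apply PySem.Dict.ext
        show pvCF l = _
        unfold pvCF
        refine List.map_congr_left (fun k hk => ?_)
        by_cases hkp : k = pvParam x
        · subst hkp
          simp [hmax, hlt, hm]
        · have hb' : (pvParam x == k) = false := beq_eq_false_iff_ne.mpr (Ne.symm hkp)
          simp [hb']
    · rw [if_neg hp]
      have hcont : (PySem.Dict.mk (pvCF l)).contains (pvParam x) = false := by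
        rw [PySem.Dict.contains_eq_decide_mem_keys, pvKeysCF]
        exact decide_eq_false (fun h => hp ((PySem.Set.mem_ofList _ _).mp h))
      simp only [hcont, if_pos]
      apply PySem.Dict.ext
      rw [PySem.Dict.items_insert_of_not_contains _ _ hcont]

-- ===== VERDICT (by name: the statement is the Claim_ definition above) =====
theorem get_latest_data_spec : Claim_equal_get_latest_data := by
  intro l _ _
  show get_latest_data l = get_latest_data_alt l
  rw [pvB_eq_CF, get_latest_data, pvA_eq_CF]
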